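-- pv_equiv track=rewrite | github.com/Cuddlemuffin007/hangman | hangman.py | update_remaining_list
-- ===== SOURCE A (Python) =====
-- def update_remaining_list(guess, remaining):
--     """for use in Evil mode. Takes guess and the remaining possible word
--     list as arguments and returns an updated remaining words list and the
--     positions of any correctly guessed letters."""
--     user_guess = guess
--     remaining_words = remaining
--     word_families = {}
--     for word in remaining_words:
--         key = ''.join(user_guess if char == user_guess else '-' for char in word)
--         if key not in word_families:
--             word_families[key] = []
--         word_families[key].append(word)
--
--     sorted_families = sorted(word_families.keys(), key=lambda k: len(word_families[k]), reverse=True)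
--
--     index = sorted_families[0]
--     new_remaining = word_families[sorted_families[0]]
--
--     word_families.clear()
--
--     return index, new_remaining
-- ===== SOURCE B (Python) =====
-- def update_remaining_list(guess, remaining):
--     """Evil-hangman family split: count each guess-pattern family in one pass,
--     pick the most common pattern with max (first-seen pattern wins ties, as
--     Python's max keeps the first maximum), then collect that family by a
--     second filtering pass.  No per-family word lists and no sort."""
--     counts = {}
--     for word in remaining:
--         key = ''.join(guess if char == guess else '-' for char in word)
--         counts[key] = counts.get(key, 0) + 1
--     best = max(counts, key=counts.get)
--     return best, [w for w in remaining
--                   if ''.join(guess if char == guess else '-' for char in w) == best]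
-- ===== Notes on version B (the rewrite author's own statement) =====
-- stated objective: alternative
-- what changed: B keeps only a pattern->count dict instead of A's pattern->word-list dict, replaces A's full descending sort of the keys by a single max scan (Python's max keeps the first maximum, matching A's stable-sort tie-break), and recovers the winning family by a second filtering pass over the input; the proof covers non-empty input, on empty input A raises IndexError and B raises ValueError.
import Mathlib
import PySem

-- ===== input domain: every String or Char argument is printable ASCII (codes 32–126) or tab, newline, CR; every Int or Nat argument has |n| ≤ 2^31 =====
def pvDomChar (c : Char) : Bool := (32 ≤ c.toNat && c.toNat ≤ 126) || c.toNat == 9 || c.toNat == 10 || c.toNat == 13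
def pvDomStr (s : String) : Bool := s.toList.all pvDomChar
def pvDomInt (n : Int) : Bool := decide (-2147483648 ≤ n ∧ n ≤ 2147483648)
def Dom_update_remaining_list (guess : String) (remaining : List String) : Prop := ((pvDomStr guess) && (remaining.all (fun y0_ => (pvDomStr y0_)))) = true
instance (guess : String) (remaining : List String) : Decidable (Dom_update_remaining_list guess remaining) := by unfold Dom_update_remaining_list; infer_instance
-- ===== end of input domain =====

-- B replaces A's pattern -> word-list dict plus a full descending sort of the keys by a
-- pattern -> count dict, a single first-maximum scan over the keys and a second filtering
-- pass over the input (alternative decomposition; no speed claim).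

-- ===== PORT A =====
-- ''.join(user_guess if char == user_guess else '-' for char in word)
-- (the identical expression appears in both Pythons, so the helper is shared)
def pvKey (guess word : String) : String :=
  PySem.Str.join "" (word.toList.map (fun c => if String.ofList [c] = guess then guess else "-"))

def update_remaining_list (guess : String) (remaining : List String) : String × List String :=
  let wf := remaining.foldl (fun d w =>
      let k := pvKey guess w
      -- if key not in word_families: word_families[key] = []
      let d' := if d.contains k then d else d.insert k ([] : List String)
      -- word_families[key].append(word)
      d'.insert k (d'.getD k [] ++ [w])) PySem.Dict.empty
  let sf := PySem.List.sorted wf.keys (fun k => ((wf.getD k []).length : Int)) true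
  -- sorted_families[0] raises IndexError exactly when remaining = [], excluded by Pre_
  let index := sf.headD ""
  (index, wf.getD index [])

-- ===== PORT B =====
def update_remaining_list_alt (guess : String) (remaining : List String) : String × List String :=
  let counts := remaining.foldl (fun d w =>
      let k := pvKey guess w
      -- counts[key] = counts.get(key, 0) + 1
      d.insert k (d.getD k 0 + 1)) (PySem.Dict.empty : PySem.Dict String Int)
  -- max(counts, key=counts.get) raises ValueError exactly when remaining = [], excluded by Pre_
  let best := (PySem.List.max? counts.keys (fun k => counts.getD k 0)).getD ""
  (best, remaining.filter (fun w => pvKey guess w == best))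

-- ===== PRECONDITION & SPEC =====
-- On empty `remaining` A raises IndexError (and B raises ValueError); everywhere else A returns.
def Pre_update_remaining_list (guess : String) (remaining : List String) : Prop := remaining ≠ []
instance (guess : String) (remaining : List String) : Decidable (Pre_update_remaining_list guess remaining) := by unfold Pre_update_remaining_list; infer_instance
def pvWitness_update_remaining_list : String × List String := ("a", ["ab", "bb", "cb"])

def Spec_update_remaining_list (guess : String) (remaining : List String) (out : String × List String) : Prop := out = update_remaining_list_alt guess remaining
instance (guess : String) (remaining : List String) (out : String × List String) : Decidable (Spec_update_remaining_list guess remaining out) := by unfold Spec_update_remaining_list; infer_instance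

-- ===== CLAIM (what is proved, stated in full; the proofs are below) =====
def Claim_equal_update_remaining_list : Prop := ∀ (guess : String) (remaining : List String), Dom_update_remaining_list guess remaining → Pre_update_remaining_list guess remaining → Spec_update_remaining_list guess remaining (update_remaining_list guess remaining)

-- ===== LEMMAS AND PROOFS =====

-- A's loop body ('if key not in wf: wf[key] = []' then append) is one dict-modify step.
theorem pv_stepA (d : PySem.Dict String (List String)) (k : String) (w : String) :
    (if d.contains k then d else d.insert k ([] : List String)).insert k
      ((if d.contains k then d else d.insert k ([] : List String)).getD k [] ++ [w])
    = d.modify k [] (fun l => l ++ [w]) := by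
  cases h : d.contains k with
  | true => simp [PySem.Dict.modify]
  | false =>
      simp only [Bool.false_eq_true, if_false, PySem.Dict.getD_insert_self,
        PySem.Dict.insert_insert_self, PySem.Dict.modify]
      rw [PySem.Dict.getD_of_not_contains d ([] : List String) h]

-- the head of an insertion-sort fold evolves exactly like a first-maximum scan
theorem pv_head?_foldl_insertBy {α : Type} (before : α → α → Bool) :
    ∀ (xs : List α) (acc : List α),
      (xs.foldl (fun a x => PySem.List.insertBy before x a) acc).head?
        = xs.foldl (fun o x => match o with
            | none => some x
            | some m => if before x m then some x else some m) acc.head? := by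
  intro xs
  induction xs with
  | nil => intro acc; rfl
  | cons x t ih =>
      intro acc
      simp only [List.foldl_cons]
      rw [ih]
      congr 1
      cases acc with
      | nil => rfl
      | cons h hs => cases hb : before x h <;> simp [PySem.List.insertBy, hb]

-- head of the stable reverse-sorted list = Python's max (first maximal element)
theorem pv_head?_sorted_rev_eq_max? {α : Type} (xs : List α) (key : α → Int) :
    (PySem.List.sorted xs key true).head? = PySem.List.max? xs key := by
  simp only [PySem.List.sorted, PySem.List.max?]
  rw [pv_head?_foldl_insertBy]
  congr 1
  funext o x
  cases o with
  | none => rfl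
  | some m => simp

-- A's family of pattern c is the filter of `remaining` under the pattern
theorem pv_getD_famA (g : String) (l : List String) (c : String) :
    (l.foldl (fun d w => d.modify (pvKey g w) [] (fun x => x ++ [w])) PySem.Dict.empty).getD c []
    = l.filter (fun w => pvKey g w == c) := by
  have h := PySem.Dict.getD_foldl_modify_append (l.map (fun w => (pvKey g w, w))) PySem.Dict.empty c
  rw [List.foldl_map] at h
  simpa [PySem.Dict.getD_empty, List.filter_map, Function.comp_def, List.map_map] using h

theorem pv_keys_famA (g : String) (l : List String) :
    (l.foldl (fun d w => d.modify (pvKey g w) [] (fun x => x ++ [w])) PySem.Dict.empty).keys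
    = PySem.Set.ofList (l.map (fun w => pvKey g w)) := by
  simpa [PySem.Set.ofList_eq_foldl, PySem.Set.update, PySem.Dict.keys_empty] using
    PySem.Dict.keys_foldl_modify_key l (fun w => pvKey g w) [] (fun _ w x => x ++ [w]) PySem.Dict.empty

-- B's counting loop is Counter of the pattern list
theorem pv_countsB (g : String) (l : List String) :
    l.foldl (fun d w => d.insert (pvKey g w) (d.getD (pvKey g w) 0 + 1)) PySem.Dict.empty
    = PySem.Dict.counter (l.map (fun w => pvKey g w)) := by
  rw [← PySem.Dict.foldl_insert_getD_add_one_eq_counter, List.foldl_map]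

-- B's count of pattern c is the length of A's family of c
theorem pv_getD_counts (g : String) (l : List String) (c : String) :
    (PySem.Dict.counter (l.map (fun w => pvKey g w))).getD c 0
    = ((l.filter (fun w => pvKey g w == c)).length : Int) := by
  rw [PySem.Dict.getD_counter]
  congr 1
  rw [List.count_eq_countP, List.countP_map, ← List.countP_eq_length_filter]
  rfl

theorem pv_main (guess : String) (remaining : List String) :
    update_remaining_list guess remaining = update_remaining_list_alt guess remaining := by
  simp only [update_remaining_list, update_remaining_list_alt, pv_stepA, pv_countsB,
             pv_getD_famA, pv_keys_famA, PySem.Dict.keys_counter, pv_getD_counts]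
  rw [List.headD_eq_head?_getD, pv_head?_sorted_rev_eq_max?]

-- ===== VERDICT (by name: the statement is the Claim_ definition above) =====
theorem update_remaining_list_spec : Claim_equal_update_remaining_list := by
  intro guess remaining _ _
  show update_remaining_list guess remaining = update_remaining_list_alt guess remaining
  exact pv_main guess remaining
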